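-- pv_equiv track=rewrite | github.com/lokeshrevathi/loki-util | python/poc/extract_object.py | splitAndReturnValueWithIndex
-- ===== SOURCE A (Python) =====
-- def splitAndReturnValueWithIndex(s: str) -> list[list[str]]:
--     i = 0
--     valIndexes = []
--     str = ''
--     index = -1
--     while i < len(s):
--         if s[i] != ' ':
--             str += s[i]
--         elif (s[i] == ' ' or i == len(s) - 1) and str != '':
--             index = i - len(str)
--             valIndexes.append([str, index])
--             str = ''
--         if i == len(s) - 1 and str != '':
--             valIndexes.append([str, i - (len(str) - 1)])
--         i += 1
--     return valIndexes
-- ===== SOURCE B (Python) =====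
-- def splitAndReturnValueWithIndex(s: str) -> list[list[str]]:
--     valIndexes = []
--     pos = 0
--     for tok in s.split(' '):
--         if tok != '':
--             valIndexes.append([tok, pos])
--         pos += len(tok) + 1
--     return valIndexes
-- ===== Notes on version B (the rewrite author's own statement) =====
-- stated objective: simpler
-- what changed: Replaces A's character-by-character buffer/index bookkeeping (with a special trailing-word branch) by splitting the string on ' ' up front and a single running-offset pass over the tokens.
import Mathlib
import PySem

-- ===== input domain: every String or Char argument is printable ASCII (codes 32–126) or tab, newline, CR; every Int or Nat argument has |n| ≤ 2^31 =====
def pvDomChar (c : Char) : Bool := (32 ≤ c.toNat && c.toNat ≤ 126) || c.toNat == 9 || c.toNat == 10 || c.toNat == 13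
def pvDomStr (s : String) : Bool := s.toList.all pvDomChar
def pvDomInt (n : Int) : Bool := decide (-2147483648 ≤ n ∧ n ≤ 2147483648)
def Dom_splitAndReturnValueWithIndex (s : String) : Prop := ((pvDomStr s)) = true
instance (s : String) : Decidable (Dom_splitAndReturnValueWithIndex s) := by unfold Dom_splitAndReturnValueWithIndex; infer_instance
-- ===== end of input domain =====

-- B replaces A's character-by-character buffer/index bookkeeping by split(' ') plus a
-- running-offset pass over the tokens (objective: simpler; same asymptotic cost).

-- ===== PORT A =====
-- A's while-loop body at character c (position i, length n): returns the new buffer and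
-- the new valIndexes list; the str buffer is a List Char, turned into a String on append.
def pvA_step (c : Char) (n i : Int) (buf : List Char) (acc : List (String × Int)) :
    List Char × List (String × Int) :=
  let pr : List Char × List (String × Int) :=
    if c ≠ ' ' then (buf ++ [c], acc)
    else if (c = ' ' ∨ i = n - 1) ∧ buf ≠ [] then
      ([], acc ++ [(String.ofList buf, i - (buf.length : Int))])
    else (buf, acc)
  if i = n - 1 ∧ pr.1 ≠ [] then
    (pr.1, pr.2 ++ [(String.ofList pr.1, i - ((pr.1.length : Int) - 1))])
  else pr

-- A's while loop over indices 0..len(s)-1.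
def pvA_loop : List Char → Int → Int → List Char → List (String × Int) → List (String × Int)
  | [], _, _, _, acc => acc
  | c :: rest, n, i, buf, acc =>
    pvA_loop rest n (i + 1) (pvA_step c n i buf acc).1 (pvA_step c n i buf acc).2

def splitAndReturnValueWithIndex (s : String) : List (String × Int) :=
  pvA_loop s.toList (PySem.Str.len s) 0 [] []

-- ===== PORT B =====
-- B's for loop over s.split(' ') with a running offset; Python's split on the
-- single character ' ' is exactly List.splitOn ' ' on the code points.
def pvB_loop : List (List Char) → List (String × Int) → Int → List (String × Int)
  | [], res, _ => res
  | t :: ts, res, pos =>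
    pvB_loop ts (if t ≠ [] then res ++ [(String.ofList t, pos)] else res)
      (pos + (t.length : Int) + 1)

def splitAndReturnValueWithIndex_alt (s : String) : List (String × Int) :=
  pvB_loop (s.toList.splitOn ' ') [] 0

-- ===== PRECONDITION & SPEC =====
def Spec_splitAndReturnValueWithIndex (s : String) (out : List (String × Int)) : Prop := out = splitAndReturnValueWithIndex_alt s
instance (s : String) (out : List (String × Int)) : Decidable (Spec_splitAndReturnValueWithIndex s out) := by unfold Spec_splitAndReturnValueWithIndex; infer_instance

-- ===== CLAIM (what is proved, stated in full; the proofs are below) =====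
def Claim_equal_splitAndReturnValueWithIndex : Prop := ∀ (s : String), Dom_splitAndReturnValueWithIndex s → Spec_splitAndReturnValueWithIndex s (splitAndReturnValueWithIndex s)

-- ===== LEMMAS AND PROOFS =====

-- Common reference: scan position p, current buffer buf (which started at p - |buf|);
-- the buffer is emitted at a space and at the end of the string.
def pvSpec : List Char → Int → List Char → List (String × Int)
  | [], p, buf => if buf ≠ [] then [(String.ofList buf, p - (buf.length : Int))] else []
  | c :: rest, p, buf =>
    if c = ' ' then
      (if buf ≠ [] then [(String.ofList buf, p - (buf.length : Int))] else []) ++ pvSpec rest (p + 1) []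
    else pvSpec rest (p + 1) (buf ++ [c])

-- A-side reference: like pvSpec but with A's last-character branch instead of a nil emission.
def pvSpecG : List Char → Int → List Char → List (String × Int)
  | [], _, _ => []
  | c :: rest, i, buf =>
    if c = ' ' then
      (if buf ≠ [] then [(String.ofList buf, i - (buf.length : Int))] else []) ++ pvSpecG rest (i + 1) []
    else if rest = [] then [(String.ofList (buf ++ [c]), i - (buf.length : Int))]
    else pvSpecG rest (i + 1) (buf ++ [c])

-- first token / remaining tokens of splitting on ' '
def pvSplitP : List Char → List Char × List (List Char)
  | [] => ([], [])
  | c :: rest =>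
    let ht := pvSplitP rest
    if c = ' ' then ([], ht.1 :: ht.2) else (c :: ht.1, ht.2)

theorem pvSplitP_sp (rest : List Char) :
    pvSplitP (' ' :: rest) = ([], (pvSplitP rest).1 :: (pvSplitP rest).2) := by
  simp [pvSplitP]

theorem pvSplitP_ns (c : Char) (rest : List Char) (h : c ≠ ' ') :
    pvSplitP (c :: rest) = (c :: (pvSplitP rest).1, (pvSplitP rest).2) := by
  simp [pvSplitP, h]

theorem pvSplitOn_eq (cs : List Char) :
    cs.splitOn ' ' = (pvSplitP cs).1 :: (pvSplitP cs).2 := by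
  induction cs with
  | nil => simp [List.splitOn, pvSplitP]
  | cons c rest ih =>
    simp only [List.splitOn] at ih ⊢
    rw [List.splitOnP_cons, ih]
    by_cases hc : c = ' '
    · subst hc; simp [pvSplitP_sp]
    · simp [pvSplitP_ns c rest hc, hc]

theorem pvA_step_ns (c : Char) (n i : Int) (buf : List Char) (acc : List (String × Int))
    (h : c ≠ ' ') (hl : ¬ i = n - 1) : pvA_step c n i buf acc = (buf ++ [c], acc) := by
  simp [pvA_step, h, hl]

theorem pvA_step_ns_last (c : Char) (n i : Int) (buf : List Char) (acc : List (String × Int))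
    (h : c ≠ ' ') (hl : i = n - 1) :
    pvA_step c n i buf acc
      = (buf ++ [c], acc ++ [(String.ofList (buf ++ [c]), i - (((buf ++ [c]).length : Int) - 1))]) := by
  simp [pvA_step, h, hl]

theorem pvA_step_sp (n i : Int) (buf : List Char) (acc : List (String × Int)) (hb : buf ≠ []) :
    pvA_step ' ' n i buf acc = ([], acc ++ [(String.ofList buf, i - (buf.length : Int))]) := by
  simp [pvA_step, hb]

theorem pvA_step_sp_nil (n i : Int) (acc : List (String × Int)) :
    pvA_step ' ' n i [] acc = ([], acc) := by
  simp [pvA_step]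

theorem pvA_loop_eq (cs : List Char) :
    ∀ (n i : Int) (buf : List Char) (acc : List (String × Int)),
      n = i + cs.length → pvA_loop cs n i buf acc = acc ++ pvSpecG cs i buf := by
  induction cs with
  | nil => intro n i buf acc h; simp [pvA_loop, pvSpecG]
  | cons c rest ih =>
    intro n i buf acc h
    simp only [List.length_cons] at h
    have step : pvA_loop (c :: rest) n i buf acc
        = pvA_loop rest n (i + 1) (pvA_step c n i buf acc).1 (pvA_step c n i buf acc).2 := rfl
    rw [step, ih n (i + 1) _ _ (by push_cast at h ⊢; omega)]
    by_cases hr : rest = []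
    · subst hr
      have hlast : i = n - 1 := by simp at h; omega
      by_cases hc : c = ' '
      · subst hc
        by_cases hb : buf = []
        · subst hb; rw [pvA_step_sp_nil]; simp [pvSpecG]
        · rw [pvA_step_sp n i buf acc hb]; simp [pvSpecG, hb]
      · rw [pvA_step_ns_last c n i buf acc hc hlast]
        have harith : i - (((buf ++ [c]).length : Int) - 1) = i - (buf.length : Int) := by
          simp only [List.length_append, List.length_cons, List.length_nil]; push_cast; omega
        simp [pvSpecG, hc, harith]
    · have hlast : ¬ i = n - 1 := by
        have : 0 < rest.length := List.length_pos_iff.mpr hr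
        push_cast at h; omega
      by_cases hc : c = ' '
      · subst hc
        by_cases hb : buf = []
        · subst hb; rw [pvA_step_sp_nil]; simp [pvSpecG]
        · rw [pvA_step_sp n i buf acc hb]; simp [pvSpecG, hb]
      · rw [pvA_step_ns c n i buf acc hc hlast]
        simp [pvSpecG, hc, hr]

theorem pvSpecG_eq_pvSpec (cs : List Char) :
    ∀ (i : Int) (buf : List Char), cs ≠ [] → pvSpecG cs i buf = pvSpec cs i buf := by
  induction cs with
  | nil => intro _ _ h; exact absurd rfl h
  | cons c rest ih =>
    intro i buf _
    by_cases hr : rest = []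
    · subst hr
      by_cases hc : c = ' '
      · subst hc; simp [pvSpecG, pvSpec]
      · have harith : (i + 1) - (((buf ++ [c]).length : Int)) = i - (buf.length : Int) := by
          simp only [List.length_append, List.length_cons, List.length_nil]; push_cast; omega
        simp only [pvSpecG, pvSpec, if_neg hc]
        simp [harith]
    · by_cases hc : c = ' '
      · subst hc; simp [pvSpecG, pvSpec, ih (i + 1) [] hr]
      · simp [pvSpecG, pvSpec, hc, hr, ih (i + 1) (buf ++ [c]) hr]

theorem pvB_loop_eq (cs : List Char) :
    ∀ (p : Int) (buf : List Char) (res : List (String × Int)),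
      pvB_loop ((buf ++ (pvSplitP cs).1) :: (pvSplitP cs).2) res (p - (buf.length : Int))
        = res ++ pvSpec cs p buf := by
  induction cs with
  | nil =>
    intro p buf res
    by_cases hb : buf = [] <;> simp [pvSplitP, pvB_loop, pvSpec, hb]
  | cons c rest ih =>
    intro p buf res
    have step : ∀ (t : List Char) (ts : List (List Char)) (r : List (String × Int)) (pos : Int),
        pvB_loop (t :: ts) r pos
          = pvB_loop ts (if t ≠ [] then r ++ [(String.ofList t, pos)] else r)
              (pos + (t.length : Int) + 1) := fun _ _ _ _ => rfl
    by_cases hc : c = ' '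
    · subst hc
      rw [pvSplitP_sp]
      simp only
      rw [step]
      have h1 : p - (buf.length : Int) + ((buf ++ []).length : Int) + 1
          = (p + 1) - (([] : List Char).length : Int) := by
        simp only [List.length_append, List.length_nil]; push_cast; omega
      rw [h1]
      have h2 := ih (p + 1) []
        (if buf ++ [] ≠ [] then res ++ [(String.ofList (buf ++ []), p - (buf.length : Int))] else res)
      simp only [List.nil_append] at h2
      rw [h2]
      by_cases hb : buf = [] <;> simp [hb, pvSpec]
    · rw [pvSplitP_ns c rest hc]
      simp only
      have h2 : (buf ++ [c]) ++ (pvSplitP rest).1 = buf ++ c :: (pvSplitP rest).1 := by simp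
      have h3 : (p + 1) - (((buf ++ [c]).length : Int)) = p - (buf.length : Int) := by
        simp only [List.length_append, List.length_cons, List.length_nil]; push_cast; omega
      have hih := ih (p + 1) (buf ++ [c]) res
      rw [h2, h3] at hih
      rw [hih]
      simp [pvSpec, hc]

-- ===== VERDICT (by name: the statement is the Claim_ definition above) =====
theorem splitAndReturnValueWithIndex_spec : Claim_equal_splitAndReturnValueWithIndex := by
  intro s _
  unfold Spec_splitAndReturnValueWithIndex
  unfold splitAndReturnValueWithIndex splitAndReturnValueWithIndex_alt
  rw [pvSplitOn_eq]
  have hB := pvB_loop_eq s.toList 0 [] []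
  simp only [List.length_nil, Nat.cast_zero, Int.sub_zero, List.nil_append] at hB
  rw [hB]
  have hlen : PySem.Str.len s = (s.toList.length : Int) := by simp
  rcases hcs : s.toList with _ | ⟨c, rest⟩
  · simp [pvA_loop, pvSpec]
  · rw [hcs] at hlen
    rw [pvA_loop_eq (c :: rest) (PySem.Str.len s) 0 [] [] (by rw [hlen]; push_cast; omega)]
    rw [pvSpecG_eq_pvSpec (c :: rest) 0 [] (by simp)]
    simp
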